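-- pv_equiv track=rewrite | github.com/jordanchongja/gap-solver-app | app.py | solve_backtracking
-- ===== SOURCE A (Python) =====
-- def solve_backtracking(board, shapes):
--     def find_empty(b):
--         for r in range(len(b)):
--             for c in range(len(b[0])):
--                 if b[r][c] == 'blank': return (r, c)
--         return None
--
--     def is_valid(b, s, pos):
--         # Row check
--         for i in range(len(b[0])):
--             if b[pos[0]][i] == s and pos[1] != i: return False
--         # Col check
--         for i in range(len(b)):
--             if b[i][pos[1]] == s and pos[0] != i: return False
--         return True
--
--     find = find_empty(board)
--     if not find: return True
--     row, col = find
--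
--     for shape in shapes:
--         if is_valid(board, shape, (row, col)):
--             board[row][col] = shape
--             if solve_backtracking(board, shapes): return True
--             board[row][col] = 'blank'
--
--     return False
-- ===== SOURCE B (Python) =====
-- def solve_backtracking(board, shapes):
--     # Stage 1: one pass over the board collects the blank positions (row-major)
--     # and the per-row / per-column sets of already-placed shapes.
--     w = len(board[0]) if board else 0
--     blanks = [(r, c) for r in range(len(board)) for c in range(w)
--               if board[r][c] == 'blank']
--     row_occ = [{row[c] for c in range(w) if row[c] != 'blank'} for row in board]
--     col_occ = [{board[r][c] for r in range(len(board)) if board[r][c] != 'blank'}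
--                for c in range(w)]
--
--     # Stage 2: depth-first search by index into the precomputed blank list;
--     # the board itself is never read (or written) again.
--     def go(i):
--         if i == len(blanks):
--             return True
--         r, c = blanks[i]
--         for s in shapes:
--             if s not in row_occ[r] and s not in col_occ[c]:
--                 row_occ[r].add(s)
--                 col_occ[c].add(s)
--                 if go(i + 1):
--                     return True
--                 row_occ[r].discard(s)
--                 col_occ[c].discard(s)
--         return False
--
--     return go(0)
-- ===== Notes on version B (the rewrite author's own statement) =====
-- stated objective: alternative
-- what changed: B does one preprocessing pass that extracts the row-major list of blank positions and per-row/per-column occupancy sets, then searches by recursion over an index into that fixed position list with O(1) set add/discard, so the board is never re-scanned (A re-runs find_empty over the whole board and two row/column validity scans at every search node).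
-- outside the precondition, e.g. on solve_backtracking([['blank'], []], []): A returns False, B raises IndexError; on solve_backtracking([['blank', 'blank']], ['blank']): A returns False, B returns False
import Mathlib
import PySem

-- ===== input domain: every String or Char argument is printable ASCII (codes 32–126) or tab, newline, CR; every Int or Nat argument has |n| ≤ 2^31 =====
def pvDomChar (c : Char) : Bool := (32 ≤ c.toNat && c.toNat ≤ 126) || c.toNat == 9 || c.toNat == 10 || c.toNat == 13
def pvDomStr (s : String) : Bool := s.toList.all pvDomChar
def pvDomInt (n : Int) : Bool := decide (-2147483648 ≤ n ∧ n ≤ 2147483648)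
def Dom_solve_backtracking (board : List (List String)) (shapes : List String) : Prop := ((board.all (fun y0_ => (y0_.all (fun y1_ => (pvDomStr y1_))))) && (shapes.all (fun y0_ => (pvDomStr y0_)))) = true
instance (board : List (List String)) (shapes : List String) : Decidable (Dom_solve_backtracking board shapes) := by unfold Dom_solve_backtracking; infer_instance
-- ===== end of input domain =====

-- B precomputes the row-major list of blank positions and per-row/per-column occupancy sets
-- in one pass, then searches by recursion over that fixed position list with set updates;
-- the board is never re-scanned (objective: alternative).
-- A mutates `board` in place during the search (and leaves it solved on success); B does not
-- touch `board` after preprocessing: the equivalence proved here is about the RETURN value.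

-- ===== PORT A =====
-- b[r][c] (indices produced by range(), always in range under Pre_)
def pvCell (b : List (List String)) (r c : Nat) : String := (b.getD r []).getD c ""
-- board[row][col] = v
def pvSetCell (b : List (List String)) (r c : Nat) (v : String) : List (List String) :=
  b.set r ((b.getD r []).set c v)
-- fuel bound for A's recursion: number of 'blank' cells (each recursive call fills one under Pre_)
def pvBlanks (b : List (List String)) : Nat := (b.map (fun row => row.count "blank")).sum

def pvFindEmptyA (b : List (List String)) : Option (Nat × Nat) :=
  (List.range b.length).findSome? (fun r =>
    (List.range (b.headD []).length).findSome? (fun c =>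
      if pvCell b r c = "blank" then some (r, c) else none))

def pvIsValid (b : List (List String)) (s : String) (r c : Nat) : Bool :=
  ((List.range (b.headD []).length).all (fun i => !(pvCell b r i == s && !(c == i)))) &&
  ((List.range b.length).all (fun i => !(pvCell b i c == s && !(r == i))))

def pvSolveA : Nat → List (List String) → List String → Bool
  | 0, _, _ => false
  | fuel+1, b, shapes =>
    match pvFindEmptyA b with
    | none => true
    | some (r, c) =>
        shapes.any (fun s => pvIsValid b s r c && pvSolveA fuel (pvSetCell b r c s) shapes)

def solve_backtracking (board : List (List String)) (shapes : List String) : Bool :=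
  pvSolveA (pvBlanks board + 1) board shapes

-- ===== PORT B =====
-- [(r, c) for r in range(len(board)) for c in range(w) if board[r][c] == 'blank']
def pvBlanksList (w : Nat) (b : List (List String)) : List (Nat × Nat) :=
  (List.range b.length).flatMap (fun r =>
    ((List.range w).filter (fun c => pvCell b r c == "blank")).map (fun c => (r, c)))

-- {row[c] for c in range(w) if row[c] != 'blank'}
def pvRowSet (w : Nat) (row : List String) : PySem.Set String :=
  PySem.Set.ofList (((List.range w).map (fun c => row.getD c "")).filter (fun v => v != "blank"))
-- {board[r][c] for r in range(len(board)) if board[r][c] != 'blank'}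
def pvColSet (b : List (List String)) (c : Nat) : PySem.Set String :=
  PySem.Set.ofList ((b.map (fun row => row.getD c "")).filter (fun v => v != "blank"))

-- go(i): structural recursion over the suffix of the precomputed blank-position list
def pvSolveC (shapes : List String) :
    List (Nat × Nat) → List (PySem.Set String) → List (PySem.Set String) → Bool
  | [], _, _ => true
  | (r, c) :: ps, rows, cols =>
      shapes.any (fun s =>
        !(PySem.Set.contains (rows.getD r PySem.Set.empty) s) &&
        (!(PySem.Set.contains (cols.getD c PySem.Set.empty) s) &&
         pvSolveC shapes ps (rows.modify r (fun t => PySem.Set.add t s))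
           (cols.modify c (fun t => PySem.Set.add t s))))

def solve_backtracking_alt (board : List (List String)) (shapes : List String) : Bool :=
  let w := (board.headD []).length
  pvSolveC shapes (pvBlanksList w board)
    (board.map (pvRowSet w)) ((List.range w).map (pvColSet board))

-- ===== PRECONDITION & SPEC =====
-- Pre_ excludes ragged boards (a row shorter than the first row), on which A usually raises
-- IndexError (B always does), and shape lists containing 'blank' when the scanned region holds a
-- blank cell, on which A can recurse without bound (RecursionError) and any termination is accidental.
def Pre_solve_backtracking (board : List (List String)) (shapes : List String) : Prop :=
  (∀ row ∈ board, (board.headD []).length ≤ row.length) ∧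
  ("blank" ∈ shapes → ∀ row ∈ board, "blank" ∉ row.take (board.headD []).length)
instance (board : List (List String)) (shapes : List String) : Decidable (Pre_solve_backtracking board shapes) := by unfold Pre_solve_backtracking; infer_instance

def pvWitness_solve_backtracking : List (List String) × List String :=
  ([["blank", "b"], ["b", "blank"]], ["a", "b"])

def Spec_solve_backtracking (board : List (List String)) (shapes : List String) (out : Bool) : Prop := out = solve_backtracking_alt board shapes
instance (board : List (List String)) (shapes : List String) (out : Bool) : Decidable (Spec_solve_backtracking board shapes out) := by unfold Spec_solve_backtracking; infer_instance

-- ===== CLAIM (what is proved, stated in full; the proofs are below) =====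
def Claim_equal_solve_backtracking : Prop := ∀ (board : List (List String)) (shapes : List String), Dom_solve_backtracking board shapes → Pre_solve_backtracking board shapes → Spec_solve_backtracking board shapes (solve_backtracking board shapes)

-- ===== LEMMAS AND PROOFS =====

-- The state invariant threaded through B's search: the cached width, the rectangularity of the
-- current board, and the sets being exactly the non-blank occupants.
def pvInv (w : Nat) (b : List (List String)) (rows cols : List (PySem.Set String)) : Prop :=
  (b.headD []).length = w ∧ (∀ row ∈ b, w ≤ row.length) ∧
  rows.length = b.length ∧ cols.length = w ∧
  (∀ r < b.length, ∀ s : String, s ≠ "blank" →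
    (s ∈ rows.getD r [] ↔ ∃ c < w, pvCell b r c = s)) ∧
  (∀ c < w, ∀ s : String, s ≠ "blank" →
    (s ∈ cols.getD c [] ↔ ∃ r < b.length, pvCell b r c = s))

theorem pv_headD_getD {α : Type} (l : List α) (d : α) : l.headD d = l.getD 0 d := by
  cases l <;> rfl

theorem pv_getD_set {α : Type} (l : List α) (i j : Nat) (a d : α) :
    (l.set i a).getD j d = if i = j ∧ i < l.length then a else l.getD j d := by
  rw [List.getD_eq_getElem?_getD, List.getD_eq_getElem?_getD, List.getElem?_set]
  by_cases h : i = j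
  · subst h
    by_cases hl : i < l.length
    · simp [hl]
    · simp [hl]
  · simp [h]

theorem pv_getD_modify {α : Type} (l : List α) (i j : Nat) (f : α → α) (d : α)
    (hj : j < l.length) :
    (l.modify i f).getD j d = if i = j then f (l.getD j d) else l.getD j d := by
  rw [List.getD_eq_getElem _ d (by simpa using hj), List.getD_eq_getElem l d hj,
      List.getElem_modify]

theorem pv_findSome_guard {α β : Type} (l : List α) (p : α → Bool) (f : α → β) :
    l.findSome? (fun x => if p x then some (f x) else none) = (l.find? p).map f := by
  induction l with
  | nil => rfl
  | cons a t ih => by_cases h : p a <;> simp [h, ih]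

theorem pv_head_flatMap {α β : Type} (l : List α) (f : α → List β) :
    (l.flatMap f).head? = l.findSome? (fun a => (f a).head?) := by
  induction l with
  | nil => rfl
  | cons a t ih =>
    rw [List.flatMap_cons, List.head?_append, List.findSome?_cons]
    cases h : (f a).head? with
    | some b => rfl
    | none => simpa using ih

theorem pv_head_filter {α : Type} (p : α → Bool) (l : List α) :
    (l.filter p).head? = l.find? p := by
  induction l with
  | nil => rfl
  | cons a t ih => by_cases h : p a <;> simp [h, ih]

-- A's find_empty is the head of the precomputed blank-position list
theorem pv_find_eq_head (b : List (List String)) :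
    pvFindEmptyA b = (pvBlanksList ((b.headD []).length) b).head? := by
  rw [pvFindEmptyA, pvBlanksList, pv_head_flatMap]
  congr 1
  funext r
  rw [List.head?_map, pv_head_filter]
  have hguard : (fun c => if pvCell b r c = "blank" then some ((r, c) : Nat × Nat) else none)
      = (fun c => if (pvCell b r c == "blank") then some ((r, c) : Nat × Nat) else none) := by
    funext c
    by_cases h : pvCell b r c = "blank" <;> simp [h]
  rw [hguard, pv_findSome_guard (List.range (b.headD []).length)
        (fun c => pvCell b r c == "blank") (fun c => (r, c))]

theorem pv_mem_blanksList (w : Nat) (b : List (List String)) (r c : Nat)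
    (h : (r, c) ∈ pvBlanksList w b) :
    r < b.length ∧ c < w ∧ pvCell b r c = "blank" := by
  simp only [pvBlanksList, List.mem_flatMap, List.mem_map, List.mem_filter,
    List.mem_range, beq_iff_eq, Prod.mk.injEq] at h
  obtain ⟨r', hr', c', ⟨hc', hcell⟩, rfl, rfl⟩ := h
  exact ⟨hr', hc', hcell⟩

theorem pv_nodup_blanksList (w : Nat) (b : List (List String)) :
    (pvBlanksList w b).Nodup := by
  rw [pvBlanksList, List.nodup_flatMap]
  refine ⟨?_, ?_⟩
  · intro r _
    exact ((List.nodup_range).filter _).map (fun a b h => by simpa using h)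
  · refine List.Pairwise.imp ?_ (List.pairwise_lt_range)
    intro r r' hlt p hp hp'
    simp only [List.mem_map, List.mem_filter] at hp hp'
    obtain ⟨c, -, rfl⟩ := hp
    obtain ⟨c', -, h⟩ := hp'
    have : r' = r := congrArg Prod.fst h
    omega

theorem pv_cell_setCell (b : List (List String)) (r c : Nat) (v : String)
    (hr : r < b.length) (hc : c < (b.getD r []).length) (r' c' : Nat) :
    pvCell (pvSetCell b r c v) r' c' = if r' = r ∧ c' = c then v else pvCell b r' c' := by
  unfold pvCell pvSetCell
  rw [pv_getD_set]
  by_cases h1 : r = r'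
  · subst h1
    rw [if_pos ⟨rfl, hr⟩, pv_getD_set]
    by_cases h2 : c = c'
    · subst h2
      rw [if_pos ⟨rfl, hc⟩, if_pos ⟨rfl, rfl⟩]
    · rw [if_neg (fun h => h2 h.1), if_neg (fun h => h2 h.2.symm)]
  · rw [if_neg (fun h => h1 h.1), if_neg (fun h => h1 h.1.symm)]

-- setting the blank cell (r, c) to a non-blank shape removes exactly (r, c) from the blank list
theorem pv_blanksList_setCell (w : Nat) (b : List (List String)) (r c : Nat) (s : String)
    (hr : r < b.length) (hc : c < (b.getD r []).length)
    (hs : s ≠ "blank") (hcell : pvCell b r c = "blank") :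
    pvBlanksList w (pvSetCell b r c s) =
      (pvBlanksList w b).filter (fun p => !(p == (r, c))) := by
  have hlen : (pvSetCell b r c s).length = b.length := by simp [pvSetCell]
  rw [pvBlanksList, pvBlanksList, List.filter_flatMap, hlen]
  apply List.flatMap_congr
  intro r' _
  rw [List.filter_map]
  congr 1
  rw [List.filter_filter]
  apply List.filter_congr
  intro c' _
  rw [pv_cell_setCell b r c s hr hc r' c']
  by_cases h1 : r' = r
  · subst h1
    by_cases h2 : c' = c
    · subst h2
      simp [hs]
    · simp [h2, Function.comp]
  · simp [h1, Function.comp]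


theorem pv_filter_ne_of_nodup {α : Type} [BEq α] [LawfulBEq α] (a : α) (l : List α)
    (h : (a :: l).Nodup) : (a :: l).filter (fun p => !(p == a)) = l := by
  rw [List.filter_cons, if_neg (by simp)]
  apply List.filter_eq_self.mpr
  intro b hb
  simp only [Bool.not_eq_eq_eq_not, Bool.not_true, beq_eq_false_iff_ne, ne_eq]
  rintro rfl
  exact (List.nodup_cons.mp h).1 hb

theorem pv_isValid_eq (w : Nat) (b : List (List String)) (rows cols : List (PySem.Set String))
    (hI : pvInv w b rows cols) (r c : Nat) (hr : r < b.length) (hc : c < w)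
    (hblank : pvCell b r c = "blank") (s : String) (hs : s ≠ "blank") :
    pvIsValid b s r c =
      (!(PySem.Set.contains (rows.getD r PySem.Set.empty) s) &&
       !(PySem.Set.contains (cols.getD c PySem.Set.empty) s)) := by
  obtain ⟨hw, hrect, hlr, hlc, hrow, hcol⟩ := hI
  have hR := hrow r hr s hs
  have hC := hcol c hc s hs
  rw [Bool.eq_iff_iff]
  simp only [pvIsValid, hw, Bool.and_eq_true, List.all_eq_true, List.mem_range,
    Bool.not_eq_true', Bool.and_eq_false_iff, beq_iff_eq, beq_eq_false_iff_ne, ne_eq,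
    Bool.not_eq_false', PySem.Set.empty]
  rw [Bool.eq_false_iff, Bool.eq_false_iff, ne_eq, ne_eq,
      PySem.Set.contains_iff, PySem.Set.contains_iff]
  constructor
  · rintro ⟨h1, h2⟩
    refine ⟨fun hmem => ?_, fun hmem => ?_⟩
    · obtain ⟨i, hi, hci⟩ := hR.mp hmem
      rcases h1 i hi with h | h
      · exact h hci
      · subst h
        rw [hblank] at hci
        exact hs hci.symm
    · obtain ⟨i, hi, hci⟩ := hC.mp hmem
      rcases h2 i hi with h | h
      · exact h hci
      · subst h
        rw [hblank] at hci
        exact hs hci.symm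
  · rintro ⟨h1, h2⟩
    exact ⟨fun i hi => Or.inl (fun hcell => h1 (hR.mpr ⟨i, hi, hcell⟩)),
           fun i hi => Or.inl (fun hcell => h2 (hC.mpr ⟨i, hi, hcell⟩))⟩

theorem pv_inv_step (w : Nat) (b : List (List String)) (rows cols : List (PySem.Set String))
    (hI : pvInv w b rows cols) (r c : Nat) (hr : r < b.length) (hc : c < w)
    (hblank : pvCell b r c = "blank") (s : String) (hs : s ≠ "blank") :
    pvInv w (pvSetCell b r c s)
      (rows.modify r (fun t => PySem.Set.add t s))
      (cols.modify c (fun t => PySem.Set.add t s)) := by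
  obtain ⟨hw, hrect, hlr, hlc, hrow, hcol⟩ := hI
  have hrowmem : b.getD r [] ∈ b := by
    rw [List.getD_eq_getElem b [] hr]; exact List.getElem_mem hr
  have hcl : c < (b.getD r []).length := lt_of_lt_of_le hc (hrect _ hrowmem)
  have hcell := pv_cell_setCell b r c s hr hcl
  have hlen : (pvSetCell b r c s).length = b.length := by
    simp [pvSetCell]
  refine ⟨?_, ?_, ?_, ?_, ?_, ?_⟩
  · -- head row keeps its length
    rw [pv_headD_getD] at hw ⊢
    unfold pvSetCell
    rw [pv_getD_set]
    split_ifs with h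
    · obtain ⟨h0, -⟩ := h
      subst h0
      rw [List.length_set]
      exact hw
    · exact hw
  · -- all rows still at least w wide
    intro row hmem
    rcases List.mem_or_eq_of_mem_set hmem with h | h
    · exact hrect _ h
    · subst h
      rw [List.length_set]
      exact hrect _ hrowmem
  · simp [List.length_modify, hlr, hlen]
  · simp [List.length_modify, hlc]
  · -- row sets
    intro r' hr' s' hs'
    rw [hlen] at hr'
    rw [pv_getD_modify rows r r' _ [] (by rw [hlr]; exact hr')]
    by_cases h : r = r'
    · subst h
      rw [if_pos rfl, PySem.Set.mem_add]
      constructor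
      · rintro (hmem | rfl)
        · obtain ⟨c', hc', hcell'⟩ := (hrow r hr' s' hs').mp hmem
          refine ⟨c', hc', ?_⟩
          rw [hcell r c', if_neg ?_]
          · exact hcell'
          · rintro ⟨-, rfl⟩
            rw [hblank] at hcell'
            exact hs' hcell'.symm
        · exact ⟨c, hc, by rw [hcell r c, if_pos ⟨rfl, rfl⟩]⟩
      · rintro ⟨c', hc', hcell'⟩
        rw [hcell r c'] at hcell'
        by_cases h2 : c' = c
        · subst h2
          rw [if_pos ⟨rfl, rfl⟩] at hcell'
          exact Or.inr hcell'.symm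
        · rw [if_neg (fun hh => h2 hh.2)] at hcell'
          exact Or.inl ((hrow r hr' s' hs').mpr ⟨c', hc', hcell'⟩)
    · rw [if_neg h, hrow r' hr' s' hs']
      exact exists_congr fun c' => and_congr_right fun _ => by
        rw [hcell r' c', if_neg (fun hh => h hh.1.symm)]
  · -- column sets
    intro c' hc' s' hs'
    simp only [hlen]
    rw [pv_getD_modify cols c c' _ [] (by rw [hlc]; exact hc')]
    by_cases h : c = c'
    · subst h
      rw [if_pos rfl, PySem.Set.mem_add]
      constructor
      · rintro (hmem | rfl)
        · obtain ⟨r', hr', hcell'⟩ := (hcol c hc' s' hs').mp hmem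
          refine ⟨r', hr', ?_⟩
          rw [hcell r' c, if_neg ?_]
          · exact hcell'
          · rintro ⟨rfl, -⟩
            rw [hblank] at hcell'
            exact hs' hcell'.symm
        · exact ⟨r, hr, by rw [hcell r c, if_pos ⟨rfl, rfl⟩]⟩
      · rintro ⟨r', hr', hcell'⟩
        rw [hcell r' c] at hcell'
        by_cases h2 : r' = r
        · subst h2
          rw [if_pos ⟨rfl, rfl⟩] at hcell'
          exact Or.inr hcell'.symm
        · rw [if_neg (fun hh => h2 hh.1)] at hcell'
          exact Or.inl ((hcol c hc' s' hs').mpr ⟨r', hr', hcell'⟩)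
    · rw [if_neg h, hcol c' hc' s' hs']
      exact exists_congr fun r' => and_congr_right fun _ => by
        rw [hcell r' c', if_neg (fun hh => h hh.2.symm)]

theorem pv_inv_init (board : List (List String))
    (hrect : ∀ row ∈ board, (board.headD []).length ≤ row.length) :
    pvInv ((board.headD []).length) board
      (board.map (pvRowSet ((board.headD []).length)))
      ((List.range ((board.headD []).length)).map (pvColSet board)) := by
  refine ⟨rfl, hrect, by simp, by simp, ?_, ?_⟩
  · intro r hr s hs
    rw [List.getD_eq_getElem _ [] (by simpa using hr), List.getElem_map]
    simp only [pvRowSet, PySem.Set.mem_ofList, List.mem_filter, List.mem_map,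
      List.mem_range, pvCell, bne_iff_ne, ne_eq, List.getD_eq_getElem board [] hr]
    constructor
    · rintro ⟨⟨c, hc, hcell⟩, -⟩
      exact ⟨c, hc, hcell⟩
    · rintro ⟨c, hc, hcell⟩
      exact ⟨⟨c, hc, hcell⟩, hcell ▸ hs⟩
  · intro c hc s hs
    rw [List.getD_eq_getElem _ [] (by simpa using hc), List.getElem_map,
        List.getElem_range]
    simp only [pvColSet, PySem.Set.mem_ofList, List.mem_filter, List.mem_map,
      pvCell, bne_iff_ne, ne_eq]
    constructor
    · rintro ⟨⟨row, hrow, hcell⟩, -⟩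
      obtain ⟨i, hi, rfl⟩ := List.mem_iff_getElem.mp hrow
      exact ⟨i, hi, by rw [List.getD_eq_getElem board [] hi]; exact hcell⟩
    · rintro ⟨r, hr, hcell⟩
      rw [List.getD_eq_getElem board [] hr] at hcell
      exact ⟨⟨board[r], List.getElem_mem hr, hcell⟩, hcell ▸ hs⟩

-- fuel accounting: l = (range l.length).map getD, so blank counts match index counts
theorem pv_count_row (row : List String) :
    ((List.range row.length).filter (fun i => row.getD i "" == "blank")).length
      = row.count "blank" := by
  have hmap : (List.range row.length).map (fun i => row.getD i "") = row := by
    apply List.ext_getElem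
    · simp
    · intro i h1 h2
      simp [List.getD_eq_getElem?_getD, List.getElem?_eq_getElem h2]
  calc ((List.range row.length).filter (fun i => row.getD i "" == "blank")).length
      = (((List.range row.length).map (fun i => row.getD i "")).filter
          (fun v => v == "blank")).length := by
        rw [List.filter_map, List.length_map]
        rfl
    _ = row.count "blank" := by rw [hmap, List.count_eq_length_filter]

theorem pv_len_blanksList (w : Nat) (b : List (List String))
    (hrect : ∀ row ∈ b, w ≤ row.length) :
    (pvBlanksList w b).length ≤ pvBlanks b := by
  rw [pvBlanksList, List.length_flatMap, pvBlanks]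
  have hmap : (List.range b.length).map (fun r => (b.getD r []).count "blank")
      = b.map (fun row => row.count "blank") := by
    apply List.ext_getElem
    · simp
    · intro i h1 h2
      simp [List.getD_eq_getElem?_getD, List.getElem?_eq_getElem (show i < b.length by simpa using h2)]
  rw [← hmap]
  apply List.sum_le_sum
  intro r hr
  simp only [List.mem_range] at hr
  simp only [List.length_map]
  have hrow : b.getD r [] ∈ b := by
    rw [List.getD_eq_getElem b [] hr]; exact List.getElem_mem hr
  calc ((List.range w).filter (fun c => pvCell b r c == "blank")).length
      ≤ ((List.range (b.getD r []).length).filter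
          (fun c => pvCell b r c == "blank")).length := by
        apply List.Sublist.length_le
        apply List.Sublist.filter
        exact (List.range_sublist).mpr (hrect _ hrow)
    _ = (b.getD r []).count "blank" := by
        rw [← pv_count_row (b.getD r [])]
        apply congrArg
        apply List.filter_congr
        intro c _
        rfl

-- main equivalence: A's fuelled search over the mutated board equals B's recursion over the
-- remaining blank-position list, under the occupancy invariant
theorem pv_main (shapes : List String) (hb : "blank" ∉ shapes) (w : Nat) :
    ∀ (ps : List (Nat × Nat)) (fuel : Nat) (b : List (List String))
      (rows cols : List (PySem.Set String)),
      pvInv w b rows cols → pvBlanksList w b = ps → ps.length < fuel →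
      pvSolveA fuel b shapes = pvSolveC shapes ps rows cols := by
  intro ps
  induction ps with
  | nil =>
    intro fuel b rows cols hI hps hfuel
    obtain ⟨n, rfl⟩ : ∃ n, fuel = n + 1 := ⟨fuel - 1, by omega⟩
    rw [pvSolveA, pv_find_eq_head, hI.1, hps]
    rfl
  | cons rc ps' ih =>
    obtain ⟨r, c⟩ := rc
    intro fuel b rows cols hI hps hfuel
    obtain ⟨n, rfl⟩ : ∃ n, fuel = n + 1 := ⟨fuel - 1, by omega⟩
    have hfind : pvFindEmptyA b = some (r, c) := by
      rw [pv_find_eq_head, hI.1, hps]; rfl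
    obtain ⟨hr, hc, hcell⟩ := pv_mem_blanksList w b r c (by rw [hps]; simp)
    rw [pvSolveA, hfind, pvSolveC]
    apply PySem.List.any_congr_mem
    intro s hs
    have hsb : s ≠ "blank" := fun hh => hb (hh ▸ hs)
    rw [pv_isValid_eq w b rows cols hI r c hr hc hcell s hsb]
    cases hRv : PySem.Set.contains (rows.getD r PySem.Set.empty) s with
    | true => simp
    | false =>
      cases hCv : PySem.Set.contains (cols.getD c PySem.Set.empty) s with
      | true => simp
      | false =>
        simp only [Bool.not_false, Bool.true_and, Bool.and_true]
        apply ih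
        · exact pv_inv_step w b rows cols hI r c hr hc hcell s hsb
        · have hcl : c < (b.getD r []).length := by
            have hrow : b.getD r [] ∈ b := by
              rw [List.getD_eq_getElem b [] hr]; exact List.getElem_mem hr
            exact lt_of_lt_of_le hc (hI.2.1 _ hrow)
          rw [pv_blanksList_setCell w b r c s hr hcl hsb hcell, hps]
          exact pv_filter_ne_of_nodup (r, c) ps' (hps ▸ pv_nodup_blanksList w b)
        · have h' : ps'.length + 1 < n + 1 := by simpa using hfuel
          omega

theorem pv_blanksList_nil (w : Nat) (b : List (List String))
    (hrect : ∀ row ∈ b, w ≤ row.length)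
    (h : ∀ row ∈ b, "blank" ∉ row.take w) : pvBlanksList w b = [] := by
  rw [pvBlanksList]
  apply List.flatMap_eq_nil_iff.mpr
  intro r hr
  simp only [List.mem_range] at hr
  apply List.map_eq_nil_iff.mpr
  rw [List.filter_eq_nil_iff]
  intro c hc
  simp only [List.mem_range] at hc
  simp only [beq_iff_eq]
  intro hcell
  have hrow : b.getD r [] ∈ b := by
    rw [List.getD_eq_getElem b [] hr]; exact List.getElem_mem hr
  have hcl : c < (b.getD r []).length := lt_of_lt_of_le hc (hrect _ hrow)
  apply h _ hrow
  apply List.mem_take_iff_getElem.mpr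
  refine ⟨c, by omega, ?_⟩
  rw [pvCell, List.getD_eq_getElem _ "" hcl] at hcell
  exact hcell

-- ===== VERDICT (by name: the statement is the Claim_ definition above) =====
theorem solve_backtracking_spec : Claim_equal_solve_backtracking := by
  intro board shapes _ hPre
  unfold Spec_solve_backtracking solve_backtracking solve_backtracking_alt
  by_cases hb : "blank" ∈ shapes
  · have hnil := pv_blanksList_nil ((board.headD []).length) board hPre.1 (hPre.2 hb)
    rw [pvSolveA, pv_find_eq_head]
    simp only [hnil]
    rfl
  · exact pv_main shapes hb ((board.headD []).length) (pvBlanksList _ board)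
      (pvBlanks board + 1) board _ _ (pv_inv_init board hPre.1) rfl
      (Nat.lt_succ_of_le (pv_len_blanksList _ board hPre.1))
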